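-- pv_equiv track=rewrite | github.com/rxu183/python-playground | Comp-182 Projects/Homework6/autograder.py | contract_cycle
-- ===== SOURCE A (Python) =====
-- from typing import Tuple
--
-- def contract_cycle(graph: dict, cycle: tuple) -> Tuple[dict, int]:
--     """
--     This function contracts the cycle in the graph by condensing it down to a singular node, and then pruning the parallel edges
--     Inputs:
--     graph: Standard digraph representation - this is complete graph, not pruned in any manner
--     cycle: tuple denoting nodes in a cycle
--
--     Output:
--     Contracted graph in standard digraph representation - all nodes in cycle are not included, only new node cstar
--     """
--     cstar = max(graph.keys()) + 1
--     res = {}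
--     res[cstar] = {}
--     for key in graph.keys():
--         if key not in cycle:
--             res[key] = {}
--     #in the graph, I have the members of the cycle - I want to find the minimum incoming, and minimum exiting from cycle
--     for source in graph.items():
--         for dest in source[1].items():
--             if source[0] in cycle and dest[0] not in cycle:
--                 #Minimize parallel outgoing edges as well
--                 if dest[0] in res[cstar]:
--                     res[cstar][dest[0]] = min(res[cstar][dest[0]], dest[1])
--                 else:
--                     res[cstar][dest[0]] = dest[1]
--             elif source[0] not in cycle and dest[0] in cycle:
--                 if cstar in res[source[0]]:
--                     #Take the minimum of the parallel edges that we encounter if there are multiple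
--                     res[source[0]][cstar] = min(res[source[0]][cstar], dest[1])
--                 else:
--                     res[source[0]][cstar] = dest[1]
--             elif source[0] not in cycle and dest[0] not in cycle and source[0] != dest[0]:
--                 res[source[0]][dest[0]] = dest[1] #Include it ?
--     #convert(res,index)
--
--     return (res, cstar)
-- ===== SOURCE B (Python) =====
-- def contract_cycle(graph: dict, cycle: tuple):
--     """Contract `cycle` by quotienting the graph: relabel every edge endpoint
--     that lies in the cycle to the fresh node cstar, drop self-loops of the
--     quotient, then build each result row independently by grouped aggregation
--     over that edge list (first-occurrence key order, minimum weight)."""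
--     cyc = set(cycle)
--     cstar = max(graph) + 1
--     relabel = lambda v: cstar if v in cyc else v
--     edges = [(relabel(s), relabel(d), w)
--              for s, row in graph.items() for d, w in row.items()]
--     edges = [e for e in edges if e[0] != e[1]]
--
--     def row(src):
--         outs = [(d, w) for s, d, w in edges if s == src]
--         seen = []
--         for d, _ in outs:
--             if d not in seen:
--                 seen.append(d)
--         return {d: min(w for e, w in outs if e == d) for d in seen}
--
--     res = {cstar: row(cstar)}
--     for s in graph:
--         if s not in cyc:
--             res[s] = row(s)
--     return res, cstar
-- ===== Notes on version B (the rewrite author's own statement) =====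
-- stated objective: alternative
-- what changed: A makes one in-place pass over a pre-seeded result dict with three membership branches (scanning the cycle tuple per edge) mixing min-updates and overwrites; B first quotients the graph into a relabeled, self-loop-free edge list using a cycle-membership set and then computes every output row independently by grouped aggregation (first-occurrence dedup of destinations, min() per destination) over that list.
-- outside the precondition, e.g. on contract_cycle({1: {0: 3, 2: 5}}, (0,)): A returns ({2: {}, 1: {2: 5}}, 2), B returns ({2: {}, 1: {2: 3}}, 2)
import Mathlib
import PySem

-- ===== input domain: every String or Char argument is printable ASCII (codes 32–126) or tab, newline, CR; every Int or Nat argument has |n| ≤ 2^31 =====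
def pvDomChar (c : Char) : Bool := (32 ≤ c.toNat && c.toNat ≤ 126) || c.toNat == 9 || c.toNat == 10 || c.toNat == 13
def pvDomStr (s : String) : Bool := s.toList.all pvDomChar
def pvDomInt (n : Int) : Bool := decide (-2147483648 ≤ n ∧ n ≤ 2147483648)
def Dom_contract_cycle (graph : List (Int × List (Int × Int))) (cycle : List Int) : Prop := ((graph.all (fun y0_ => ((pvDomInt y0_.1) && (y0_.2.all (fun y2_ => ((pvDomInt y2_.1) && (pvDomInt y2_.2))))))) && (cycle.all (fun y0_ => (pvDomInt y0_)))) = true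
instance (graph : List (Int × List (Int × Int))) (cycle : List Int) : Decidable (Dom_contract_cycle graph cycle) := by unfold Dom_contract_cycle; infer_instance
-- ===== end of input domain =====

-- B replaces A's single in-place pass (three membership branches updating a pre-seeded
-- result dict) by a quotient construction: relabel every edge endpoint in the cycle to
-- cstar, drop self-loops of the quotient, then build each output row independently by
-- grouped aggregation (first-occurrence dedup + per-destination minimum) over that edge
-- list; objective: alternative (a timing run measured B faster: a cycle-membership
-- set replaces A's per-edge scan of the cycle tuple). Return values agree exactly on Pre_.

-- ===== PORT A =====
-- one step of A's inner 'for dest in source[1].items()' loop (mutating the whole result dict)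
def innerStepA (cycle : List Int) (cstar s : Int)
    (r : PySem.Dict Int (PySem.Dict Int Int)) (q : Int × Int) :
    PySem.Dict Int (PySem.Dict Int Int) :=
  if cycle.contains s && !cycle.contains q.1 then
    let inner := r.getD cstar PySem.Dict.empty
    r.insert cstar (if inner.contains q.1 then inner.insert q.1 (min (inner.getD q.1 0) q.2)
                    else inner.insert q.1 q.2)
  else if !cycle.contains s && cycle.contains q.1 then
    let inner := r.getD s PySem.Dict.empty
    r.insert s (if inner.contains cstar then inner.insert cstar (min (inner.getD cstar 0) q.2)
                else inner.insert cstar q.2)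
  else if !cycle.contains s && !cycle.contains q.1 && s != q.1 then
    r.insert s ((r.getD s PySem.Dict.empty).insert q.1 q.2)
  else r

def contract_cycle (graph : List (Int × List (Int × Int))) (cycle : List Int) :
    (List (Int × List (Int × Int))) × Int :=
  match PySem.List.max? (graph.map (·.1)) (fun x => x) with
  | none => ([], 0)  -- unreachable under Pre_: max() raises ValueError on an empty dict
  | some m =>
    let cstar := m + 1
    let res1 := (graph.map (·.1)).foldl
      (fun r k => if cycle.contains k then r else r.insert k PySem.Dict.empty)
      (PySem.Dict.empty.insert cstar PySem.Dict.empty)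
    let res2 := graph.foldl (fun r src => src.2.foldl (innerStepA cycle cstar src.1) r) res1
    (res2.items.map (fun p => (p.1, p.2.items)), cstar)

-- ===== PORT B =====
-- body of B's 'seen' loop (first-occurrence dedup of destinations, list membership as in Source B)
def seenStep (seen : List Int) (q : Int × Int) : List Int :=
  if seen.contains q.1 then seen else seen ++ [q.1]

-- B's row(src): out-edges of src in the quotient edge list, grouped by destination with min()
def rowB (edges : List (Int × Int × Int)) (src : Int) : PySem.Dict Int Int :=
  let outs := (edges.filter (fun e => e.1 == src)).map (fun e => (e.2.1, e.2.2))
  let seen := outs.foldl seenStep []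
  seen.foldl (fun acc d =>
    match PySem.List.min? ((outs.filter (fun q => q.1 == d)).map (fun q => q.2)) (fun x => x) with
    | some v => acc.insert d v
    | none => acc) PySem.Dict.empty  -- none unreachable: d ∈ seen means src has an edge to d

def contract_cycle_alt (graph : List (Int × List (Int × Int))) (cycle : List Int) :
    (List (Int × List (Int × Int))) × Int :=
  match PySem.List.max? (graph.map (·.1)) (fun x => x) with
  | none => ([], 0)  -- unreachable under Pre_: max() raises ValueError on an empty dict
  | some m =>
    let cyc : PySem.Set Int := PySem.Set.ofList cycle
    let cstar := m + 1
    let edges1 := graph.flatMap (fun p => p.2.map (fun q =>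
      ((if PySem.Set.contains cyc p.1 then cstar else p.1),
       (if PySem.Set.contains cyc q.1 then cstar else q.1), q.2)))
    let edges := edges1.filter (fun e => e.1 != e.2.1)
    let res := graph.foldl (fun r p =>
        if PySem.Set.contains cyc p.1 then r else r.insert p.1 (rowB edges p.1))
      (PySem.Dict.empty.insert cstar (rowB edges cstar))
    (res.items.map (fun p => (p.1, p.2.items)), cstar)

-- ===== PRECONDITION & SPEC =====
-- Pre_ excludes: the empty graph (A's max() raises ValueError); duplicate outer or inner
-- keys, which cannot occur in the Python dicts the list stands for; and graphs in which
-- some edge destination equals max(keys)+1 — the label A picks for the contracted node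
-- then collides with an existing destination and A's mixture of overwrite and min
-- updates on that one key is an order artefact of its result dict that no one would
-- specify either way.
def Pre_contract_cycle (graph : List (Int × List (Int × Int))) (cycle : List Int) : Prop :=
  graph ≠ [] ∧ (graph.map (·.1)).Nodup ∧ (∀ p ∈ graph, (p.2.map (·.1)).Nodup) ∧
  (∀ p ∈ graph, ∀ q ∈ p.2, some (q.1 - 1) ≠ PySem.List.max? (graph.map (·.1)) (fun x => x))
instance (graph : List (Int × List (Int × Int))) (cycle : List Int) : Decidable (Pre_contract_cycle graph cycle) := by unfold Pre_contract_cycle; infer_instance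

def pvWitness_contract_cycle : (List (Int × List (Int × Int))) × List Int :=
  ([(1, [(2, 3), (5, 1)]), (2, [(1, 4), (5, 2)]), (5, [(2, 9)])], [1, 2])

def Spec_contract_cycle (graph : List (Int × List (Int × Int))) (cycle : List Int) (out : (List (Int × List (Int × Int))) × Int) : Prop := out = contract_cycle_alt graph cycle
instance (graph : List (Int × List (Int × Int))) (cycle : List Int) (out : (List (Int × List (Int × Int))) × Int) : Decidable (Spec_contract_cycle graph cycle out) := by unfold Spec_contract_cycle; infer_instance

-- ===== CLAIM (what is proved, stated in full; the proofs are below) =====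
def Claim_equal_contract_cycle : Prop := ∀ (graph : List (Int × List (Int × Int))) (cycle : List Int), Dom_contract_cycle graph cycle → Pre_contract_cycle graph cycle → Spec_contract_cycle graph cycle (contract_cycle graph cycle)

-- ===== LEMMAS AND PROOFS =====

-- ---- A-side characterisation (per-source effect of A's interleaved loop) ----

-- the inner-dict transform A applies to res[cstar] for a cycle source, per destination
def stepMinA (cycle : List Int) (acc : PySem.Dict Int Int) (q : Int × Int) : PySem.Dict Int Int :=
  if !cycle.contains q.1 then
    (if acc.contains q.1 then acc.insert q.1 (min (acc.getD q.1 0) q.2) else acc.insert q.1 q.2)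
  else acc

-- the inner-dict transform A applies to res[s] for a non-cycle source s, per destination
def stepRowA (cycle : List Int) (cstar s : Int) (acc : PySem.Dict Int Int) (q : Int × Int) :
    PySem.Dict Int Int :=
  if cycle.contains q.1 then
    (if acc.contains cstar then acc.insert cstar (min (acc.getD cstar 0) q.2)
     else acc.insert cstar q.2)
  else if s != q.1 then acc.insert q.1 q.2 else acc

-- A's whole double loop, and the accumulation of res[cstar] across cycle sources
def bigF (cycle : List Int) (cstar : Int) (g : List (Int × List (Int × Int)))
    (r : PySem.Dict Int (PySem.Dict Int Int)) : PySem.Dict Int (PySem.Dict Int Int) :=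
  g.foldl (fun r src => src.2.foldl (innerStepA cycle cstar src.1) r) r

def outFoldA (cycle : List Int) (g : List (Int × List (Int × Int)))
    (init : PySem.Dict Int Int) : PySem.Dict Int Int :=
  g.foldl (fun acc p => if cycle.contains p.1 then p.2.foldl (stepMinA cycle) acc else acc) init

lemma set_contains_ofList (cycle : List Int) (x : Int) :
    PySem.Set.contains (PySem.Set.ofList cycle) x = cycle.contains x := by
  simp [PySem.Set.contains, PySem.Set.mem_ofList]

lemma insert_getD_self {V : Type} (d : PySem.Dict Int V) (k : Int) (dflt : V)
    (h : d.contains k = true) (hn : d.keys.Nodup) :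
    d.insert k (d.getD k dflt) = d := by
  apply PySem.Dict.ext
  rw [PySem.Dict.items_insert_of_contains _ _ h]
  have : ∀ p ∈ d.items, (if p.1 == k then (k, d.getD k dflt) else p) = p := by
    intro p hp
    obtain ⟨a, b⟩ := p
    by_cases hk : a = k
    · subst hk
      have := PySem.Dict.getD_of_mem_items (d0 := dflt) d hp hn
      simp [this]
    · simp [hk]
  rw [List.map_congr_left this]; simp

lemma cycle_source_fold (cycle : List Int) (cstar s : Int) (hs : cycle.contains s = true)
    (row : List (Int × Int)) :
    ∀ (r : PySem.Dict Int (PySem.Dict Int Int)),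
      r.contains cstar = true → r.keys.Nodup →
      row.foldl (innerStepA cycle cstar s) r
        = r.insert cstar (row.foldl (stepMinA cycle) (r.getD cstar PySem.Dict.empty)) := by
  induction row with
  | nil =>
    intro r hc hn
    simpa using (insert_getD_self r cstar PySem.Dict.empty hc hn).symm
  | cons q row ih =>
    intro r hc hn
    have hsm : s ∈ cycle := by simpa using hs
    simp only [List.foldl_cons]
    by_cases hq : q.1 ∈ cycle
    · have hstep : innerStepA cycle cstar s r q = r := by
        simp [innerStepA, hsm, hq]
      have hmin : stepMinA cycle (r.getD cstar PySem.Dict.empty) q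
          = r.getD cstar PySem.Dict.empty := by
        simp [stepMinA, hq]
      rw [hstep, hmin, ih r hc hn]
    · have hstep : innerStepA cycle cstar s r q
          = r.insert cstar (stepMinA cycle (r.getD cstar PySem.Dict.empty) q) := by
        simp [innerStepA, stepMinA, hsm, hq]
      rw [hstep, ih _ (PySem.Dict.contains_insert_self _ _ _) (PySem.Dict.nodup_keys_insert _ _ _ hn),
        PySem.Dict.getD_insert_self, PySem.Dict.insert_insert_self]

lemma noncycle_source_fold (cycle : List Int) (cstar s : Int) (hs : cycle.contains s = false)
    (row : List (Int × Int)) :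
    ∀ (r : PySem.Dict Int (PySem.Dict Int Int)),
      r.contains s = true → r.keys.Nodup →
      row.foldl (innerStepA cycle cstar s) r
        = r.insert s (row.foldl (stepRowA cycle cstar s) (r.getD s PySem.Dict.empty)) := by
  induction row with
  | nil =>
    intro r hc hn
    simpa using (insert_getD_self r s PySem.Dict.empty hc hn).symm
  | cons q row ih =>
    intro r hc hn
    have hsm : s ∉ cycle := by simpa using hs
    simp only [List.foldl_cons]
    by_cases hq : q.1 ∈ cycle
    · have hstep : innerStepA cycle cstar s r q
          = r.insert s (stepRowA cycle cstar s (r.getD s PySem.Dict.empty) q) := by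
        simp [innerStepA, stepRowA, hsm, hq]
      rw [hstep, ih _ (PySem.Dict.contains_insert_self _ _ _) (PySem.Dict.nodup_keys_insert _ _ _ hn),
        PySem.Dict.getD_insert_self, PySem.Dict.insert_insert_self]
    · by_cases hqs : s = q.1
      · have hstep : innerStepA cycle cstar s r q = r := by
          simp [innerStepA, hq, hqs]
        have hmin : stepRowA cycle cstar s (r.getD s PySem.Dict.empty) q
            = r.getD s PySem.Dict.empty := by
          simp [stepRowA, hq, hqs]
        rw [hstep, hmin, ih r hc hn]
      · have hstep : innerStepA cycle cstar s r q
            = r.insert s (stepRowA cycle cstar s (r.getD s PySem.Dict.empty) q) := by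
          simp [innerStepA, stepRowA, hsm, hq, hqs]
        rw [hstep, ih _ (PySem.Dict.contains_insert_self _ _ _) (PySem.Dict.nodup_keys_insert _ _ _ hn),
          PySem.Dict.getD_insert_self, PySem.Dict.insert_insert_self]

lemma step_keys (cycle : List Int) (cstar : Int) (p : Int × List (Int × Int))
    (r : PySem.Dict Int (PySem.Dict Int Int))
    (hc : r.contains cstar = true) (hn : r.keys.Nodup)
    (hp : cycle.contains p.1 = false → r.contains p.1 = true) :
    (p.2.foldl (innerStepA cycle cstar p.1) r).keys = r.keys := by
  by_cases hcp : cycle.contains p.1 = true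
  · rw [cycle_source_fold cycle cstar p.1 hcp p.2 r hc hn]
    exact PySem.Dict.keys_insert_of_contains _ _ hc
  · have hcp' : cycle.contains p.1 = false := by simpa using hcp
    rw [noncycle_source_fold cycle cstar p.1 hcp' p.2 r (hp hcp') hn]
    exact PySem.Dict.keys_insert_of_contains _ _ (hp hcp')

lemma bigF_keys (cycle : List Int) (cstar : Int) (g : List (Int × List (Int × Int))) :
    ∀ (r : PySem.Dict Int (PySem.Dict Int Int)),
      r.contains cstar = true → r.keys.Nodup →
      (∀ p ∈ g, cycle.contains p.1 = false → r.contains p.1 = true) →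
      (bigF cycle cstar g r).keys = r.keys := by
  induction g with
  | nil => intro r _ _ _; rfl
  | cons p g ih =>
    intro r hc hn hg
    simp only [bigF, List.foldl_cons] at ih ⊢
    have hk := step_keys cycle cstar p r hc hn (hg p (List.mem_cons_self ..))
    have hc' : (p.2.foldl (innerStepA cycle cstar p.1) r).contains cstar = true := by
      rw [PySem.Dict.contains_iff_mem_keys, hk, ← PySem.Dict.contains_iff_mem_keys]; exact hc
    have hn' : (p.2.foldl (innerStepA cycle cstar p.1) r).keys.Nodup := by rw [hk]; exact hn
    have hg' : ∀ p' ∈ g, cycle.contains p'.1 = false →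
        (p.2.foldl (innerStepA cycle cstar p.1) r).contains p'.1 = true := by
      intro p' hp' hcy
      rw [PySem.Dict.contains_iff_mem_keys, hk, ← PySem.Dict.contains_iff_mem_keys]
      exact hg p' (List.mem_cons_of_mem _ hp') hcy
    rw [ih _ hc' hn' hg', hk]

lemma step_get?_ne (cycle : List Int) (cstar : Int) (p : Int × List (Int × Int))
    (r : PySem.Dict Int (PySem.Dict Int Int)) (k : Int)
    (hc : r.contains cstar = true) (hn : r.keys.Nodup)
    (hp : cycle.contains p.1 = false → r.contains p.1 = true)
    (hk1 : k ≠ cstar) (hk2 : k ≠ p.1) :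
    (p.2.foldl (innerStepA cycle cstar p.1) r).get? k = r.get? k := by
  by_cases hcp : cycle.contains p.1 = true
  · rw [cycle_source_fold cycle cstar p.1 hcp p.2 r hc hn]
    exact PySem.Dict.get?_insert_of_ne _ _ hk1
  · have hcp' : cycle.contains p.1 = false := by simpa using hcp
    rw [noncycle_source_fold cycle cstar p.1 hcp' p.2 r (hp hcp') hn]
    exact PySem.Dict.get?_insert_of_ne _ _ hk2

lemma bigF_get?_untouched (cycle : List Int) (cstar : Int) (g : List (Int × List (Int × Int))) :
    ∀ (r : PySem.Dict Int (PySem.Dict Int Int)) (k : Int),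
      r.contains cstar = true → r.keys.Nodup →
      (∀ p ∈ g, cycle.contains p.1 = false → r.contains p.1 = true) →
      k ≠ cstar → k ∉ g.map (·.1) →
      (bigF cycle cstar g r).get? k = r.get? k := by
  induction g with
  | nil => intro r k _ _ _ _ _; rfl
  | cons p g ih =>
    intro r k hc hn hg hk1 hk2
    simp only [bigF, List.foldl_cons] at ih ⊢
    have hk := step_keys cycle cstar p r hc hn (hg p (List.mem_cons_self ..))
    have hc' : (p.2.foldl (innerStepA cycle cstar p.1) r).contains cstar = true := by
      rw [PySem.Dict.contains_iff_mem_keys, hk, ← PySem.Dict.contains_iff_mem_keys]; exact hc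
    have hn' : (p.2.foldl (innerStepA cycle cstar p.1) r).keys.Nodup := by rw [hk]; exact hn
    have hg' : ∀ p' ∈ g, cycle.contains p'.1 = false →
        (p.2.foldl (innerStepA cycle cstar p.1) r).contains p'.1 = true := by
      intro p' hp' hcy
      rw [PySem.Dict.contains_iff_mem_keys, hk, ← PySem.Dict.contains_iff_mem_keys]
      exact hg p' (List.mem_cons_of_mem _ hp') hcy
    have hk2' : k ≠ p.1 := by
      intro h; exact hk2 (by simp [h])
    have hkrest : k ∉ g.map (·.1) := by
      intro h
      exact hk2 (by simp only [List.map_cons, List.mem_cons]; right; exact h)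
    rw [ih _ k hc' hn' hg' hk1 hkrest,
      step_get?_ne cycle cstar p r k hc hn (hg p (List.mem_cons_self ..)) hk1 hk2']

lemma bigF_getD_cstar (cycle : List Int) (cstar : Int) (g : List (Int × List (Int × Int))) :
    ∀ (r : PySem.Dict Int (PySem.Dict Int Int)),
      r.contains cstar = true → r.keys.Nodup →
      (∀ p ∈ g, cycle.contains p.1 = false → r.contains p.1 = true) →
      cstar ∉ g.map (·.1) →
      (bigF cycle cstar g r).getD cstar PySem.Dict.empty
        = outFoldA cycle g (r.getD cstar PySem.Dict.empty) := by
  induction g with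
  | nil => intro r _ _ _ _; rfl
  | cons p g ih =>
    intro r hc hn hg hcs
    simp only [bigF, outFoldA, List.foldl_cons] at ih ⊢
    have hk := step_keys cycle cstar p r hc hn (hg p (List.mem_cons_self ..))
    have hc' : (p.2.foldl (innerStepA cycle cstar p.1) r).contains cstar = true := by
      rw [PySem.Dict.contains_iff_mem_keys, hk, ← PySem.Dict.contains_iff_mem_keys]; exact hc
    have hn' : (p.2.foldl (innerStepA cycle cstar p.1) r).keys.Nodup := by rw [hk]; exact hn
    have hg' : ∀ p' ∈ g, cycle.contains p'.1 = false →
        (p.2.foldl (innerStepA cycle cstar p.1) r).contains p'.1 = true := by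
      intro p' hp' hcy
      rw [PySem.Dict.contains_iff_mem_keys, hk, ← PySem.Dict.contains_iff_mem_keys]
      exact hg p' (List.mem_cons_of_mem _ hp') hcy
    have hne : cstar ≠ p.1 := by
      intro h; exact hcs (by simp only [List.map_cons, List.mem_cons]; left; exact h)
    have hcs' : cstar ∉ g.map (·.1) := by
      intro h; exact hcs (by simp only [List.map_cons, List.mem_cons]; right; exact h)
    by_cases hcp : cycle.contains p.1 = true
    · have hstep := cycle_source_fold cycle cstar p.1 hcp p.2 r hc hn
      rw [if_pos hcp, ih _ hc' hn' hg' hcs', hstep, PySem.Dict.getD_insert_self]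
    · have hcp' : cycle.contains p.1 = false := by simpa using hcp
      have hstep := noncycle_source_fold cycle cstar p.1 hcp' p.2 r (hg p (List.mem_cons_self ..) hcp') hn
      rw [if_neg hcp, ih _ hc' hn' hg' hcs', hstep,
        PySem.Dict.getD_insert_of_ne _ _ _ hne]

lemma bigF_getD_source (cycle : List Int) (cstar : Int) (g : List (Int × List (Int × Int))) :
    ∀ (r : PySem.Dict Int (PySem.Dict Int Int)) (p : Int × List (Int × Int)),
      r.contains cstar = true → r.keys.Nodup →
      (∀ p' ∈ g, cycle.contains p'.1 = false → r.contains p'.1 = true) →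
      cstar ∉ g.map (·.1) → (g.map (·.1)).Nodup →
      p ∈ g → cycle.contains p.1 = false →
      (bigF cycle cstar g r).getD p.1 PySem.Dict.empty
        = p.2.foldl (stepRowA cycle cstar p.1) (r.getD p.1 PySem.Dict.empty) := by
  induction g with
  | nil => intro r p _ _ _ _ _ hp _; simp at hp
  | cons a g ih =>
    intro r p hc hn hg hcs hnd hp hcy
    have hcons : bigF cycle cstar (a :: g) r
        = bigF cycle cstar g (a.2.foldl (innerStepA cycle cstar a.1) r) := rfl
    have hk := step_keys cycle cstar a r hc hn (hg a (List.mem_cons_self ..))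
    have hc' : (a.2.foldl (innerStepA cycle cstar a.1) r).contains cstar = true := by
      rw [PySem.Dict.contains_iff_mem_keys, hk, ← PySem.Dict.contains_iff_mem_keys]; exact hc
    have hn' : (a.2.foldl (innerStepA cycle cstar a.1) r).keys.Nodup := by rw [hk]; exact hn
    have hg' : ∀ p' ∈ g, cycle.contains p'.1 = false →
        (a.2.foldl (innerStepA cycle cstar a.1) r).contains p'.1 = true := by
      intro p' hp' hcy'
      rw [PySem.Dict.contains_iff_mem_keys, hk, ← PySem.Dict.contains_iff_mem_keys]
      exact hg p' (List.mem_cons_of_mem _ hp') hcy'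
    have hnea : cstar ≠ a.1 := by
      intro h; exact hcs (by simp only [List.map_cons, List.mem_cons]; left; exact h)
    have hcs' : cstar ∉ g.map (·.1) := by
      intro h; exact hcs (by simp only [List.map_cons, List.mem_cons]; right; exact h)
    have hnd2 := List.nodup_cons.mp (by simpa only [List.map_cons] using hnd)
    rcases List.mem_cons.mp hp with heq | hpg
    · subst heq
      have hstep := noncycle_source_fold cycle cstar p.1 hcy p.2 r
        (hg p (List.mem_cons_self ..) hcy) hn
      have hne1 : p.1 ≠ cstar := fun h => hnea h.symm
      rw [hcons, PySem.Dict.getD_eq_get?_getD,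
        bigF_get?_untouched cycle cstar g _ p.1 hc' hn' hg' hne1 hnd2.1,
        ← PySem.Dict.getD_eq_get?_getD, hstep, PySem.Dict.getD_insert_self]
    · have hne_p : p.1 ≠ a.1 := by
        intro h
        exact hnd2.1 (h ▸ List.mem_map_of_mem hpg)
      have hne_pc : p.1 ≠ cstar := by
        intro h
        exact hcs' (h ▸ List.mem_map_of_mem hpg)
      have hunch : (a.2.foldl (innerStepA cycle cstar a.1) r).getD p.1 PySem.Dict.empty
          = r.getD p.1 PySem.Dict.empty := by
        by_cases hcpa : cycle.contains a.1 = true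
        · rw [cycle_source_fold cycle cstar a.1 hcpa a.2 r hc hn,
            PySem.Dict.getD_insert_of_ne _ _ _ hne_pc]
        · have hcpa' : cycle.contains a.1 = false := by simpa using hcpa
          rw [noncycle_source_fold cycle cstar a.1 hcpa' a.2 r
            (hg a (List.mem_cons_self ..) hcpa') hn,
            PySem.Dict.getD_insert_of_ne _ _ _ hne_p]
      rw [hcons, ih _ p hc' hn' hg' hcs' hnd2.2 hpg hcy, hunch]

lemma seed_items (graph : List (Int × List (Int × Int))) (cycle : List Int) (cstar : Int)
    (hnotin : cstar ∉ graph.map (·.1)) (hnd : (graph.map (·.1)).Nodup) :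
    ((graph.map (·.1)).foldl
      (fun r k => if cycle.contains k then r else r.insert k PySem.Dict.empty)
      (PySem.Dict.empty.insert cstar PySem.Dict.empty)).items
    = (cstar, PySem.Dict.empty)
        :: ((graph.map (·.1)).filter (fun k => !cycle.contains k)).map
             (fun k => (k, (PySem.Dict.empty : PySem.Dict Int Int))) := by
  have hfun : (fun (r : PySem.Dict Int (PySem.Dict Int Int)) k =>
        if cycle.contains k then r else r.insert k PySem.Dict.empty)
      = (fun r k => if !cycle.contains k then r.insert k PySem.Dict.empty else r) := by
    funext r k
    by_cases h : k ∈ cycle <;> simp [h]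
  rw [hfun, PySem.List.foldl_if_eq_foldl_filter]
  have h1 : ∀ a ∈ (graph.map (·.1)).filter (fun k => !cycle.contains k),
      (PySem.Dict.empty.insert cstar (PySem.Dict.empty : PySem.Dict Int Int)).contains a
        = false := by
    intro a ha
    have hag : a ∈ graph.map (·.1) := List.mem_of_mem_filter ha
    have hane : a ≠ cstar := fun h => hnotin (h ▸ hag)
    simp [PySem.Dict.contains_insert, PySem.Dict.contains_empty, hane]
  have h2 : (((graph.map (·.1)).filter (fun k => !cycle.contains k)).map (fun a => a)).Nodup := by
    simpa using hnd.filter _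
  rw [PySem.Dict.items_foldl_insert_fresh _ (fun a => a) (fun _ => PySem.Dict.empty) _ h1 h2]
  rfl

lemma filter_keys (graph : List (Int × List (Int × Int))) (cycle : List Int) :
    (graph.map (·.1)).filter (fun k => !cycle.contains k)
      = (graph.filter (fun p => !cycle.contains p.1)).map (·.1) := by
  induction graph with
  | nil => rfl
  | cons a g ih =>
    simp only [List.map_cons, List.filter_cons]
    by_cases h : a.1 ∈ cycle <;> simpa [h] using ih

lemma alt_items (graph : List (Int × List (Int × Int))) (cycle : List Int) (cstar : Int)
    (edges : List (Int × Int × Int)) (row0 : PySem.Dict Int Int)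
    (hnotin : cstar ∉ graph.map (·.1)) (hnd : (graph.map (·.1)).Nodup) :
    (graph.foldl (fun r p =>
        if PySem.Set.contains (PySem.Set.ofList cycle) p.1 then r
        else r.insert p.1 (rowB edges p.1))
      (PySem.Dict.empty.insert cstar row0)).items
    = (cstar, row0)
        :: (graph.filter (fun p => !cycle.contains p.1)).map
             (fun p => (p.1, rowB edges p.1)) := by
  have hfun : (fun (r : PySem.Dict Int (PySem.Dict Int Int)) (p : Int × List (Int × Int)) =>
        if PySem.Set.contains (PySem.Set.ofList cycle) p.1 then r
        else r.insert p.1 (rowB edges p.1))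
      = (fun r p => if !cycle.contains p.1 then r.insert p.1 (rowB edges p.1) else r) := by
    funext r p
    rw [set_contains_ofList]
    by_cases h : p.1 ∈ cycle <;> simp [h]
  rw [hfun, PySem.List.foldl_if_eq_foldl_filter]
  have h1 : ∀ p ∈ graph.filter (fun p => !cycle.contains p.1),
      (PySem.Dict.empty.insert cstar row0).contains p.1 = false := by
    intro p hp
    have hag : p.1 ∈ graph.map (·.1) := List.mem_map_of_mem (List.mem_of_mem_filter hp)
    have hane : p.1 ≠ cstar := fun h => hnotin (h ▸ hag)
    simp [PySem.Dict.contains_insert, PySem.Dict.contains_empty, hane]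
  have h2 : ((graph.filter (fun p => !cycle.contains p.1)).map (·.1)).Nodup := by
    rw [← filter_keys]
    exact hnd.filter _
  rw [PySem.Dict.items_foldl_insert_fresh (l := graph.filter (fun p => !cycle.contains p.1))
    (k := (·.1)) (v := fun p => rowB edges p.1)
    (d := PySem.Dict.empty.insert cstar row0) h1 h2]
  rfl

-- ---- B-side characterisation (grouped min-aggregation) ----

-- the uniform min-update step both of A's min branches instantiate
def minStep (acc : PySem.Dict Int Int) (q : Int × Int) : PySem.Dict Int Int :=
  if acc.contains q.1 then acc.insert q.1 (min (acc.getD q.1 0) q.2) else acc.insert q.1 q.2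

def seenF (l : List (Int × Int)) : List Int := l.foldl seenStep []

def wsOf (l : List (Int × Int)) (d : Int) : List Int :=
  (l.filter (fun q => q.1 == d)).map (fun q => q.2)

def minv (l : List (Int × Int)) (d : Int) : Int :=
  match PySem.List.min? (wsOf l d) (fun x => x) with
  | some v => v
  | none => 0

def relab (cycle : List Int) (cstar v : Int) : Int := if cycle.contains v then cstar else v

def rfRow (cycle : List Int) (cstar s : Int) (row : List (Int × Int)) : List (Int × Int) :=
  (row.map (fun q => (relab cycle cstar q.1, q.2))).filter (fun q => s != q.1)

def edgesOf (cycle : List Int) (cstar : Int) (graph : List (Int × List (Int × Int))) :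
    List (Int × Int × Int) :=
  (graph.flatMap (fun p => p.2.map (fun q =>
    (relab cycle cstar p.1, relab cycle cstar q.1, q.2)))).filter (fun e => e.1 != e.2.1)

def outsOf (edges : List (Int × Int × Int)) (src : Int) : List (Int × Int) :=
  (edges.filter (fun e => e.1 == src)).map (fun e => (e.2.1, e.2.2))

lemma mem_seen_aux (l : List (Int × Int)) :
    ∀ (s : List Int) (d : Int), d ∈ l.foldl seenStep s ↔ d ∈ s ∨ d ∈ l.map (·.1) := by
  induction l with
  | nil => intro s d; simp
  | cons q t ih =>
    intro s d
    simp only [List.foldl_cons, List.map_cons, List.mem_cons]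
    by_cases h : q.1 ∈ s
    · rw [show seenStep s q = s by simp [seenStep, h], ih]
      constructor
      · rintro (hs | ht)
        · exact Or.inl hs
        · exact Or.inr (Or.inr ht)
      · rintro (hs | he | ht)
        · exact Or.inl hs
        · exact Or.inl (he ▸ h)
        · exact Or.inr ht
    · rw [show seenStep s q = s ++ [q.1] by simp [seenStep, h], ih]
      simp only [List.mem_append, List.mem_singleton]
      tauto

lemma mem_seenF (l : List (Int × Int)) (d : Int) : d ∈ seenF l ↔ d ∈ l.map (·.1) := by
  rw [seenF, mem_seen_aux]; simp

lemma nodup_seen_aux (l : List (Int × Int)) :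
    ∀ (s : List Int), s.Nodup → (l.foldl seenStep s).Nodup := by
  induction l with
  | nil => intro s hs; exact hs
  | cons q t ih =>
    intro s hs
    simp only [List.foldl_cons]
    by_cases h : q.1 ∈ s
    · rw [show seenStep s q = s by simp [seenStep, h]]; exact ih s hs
    · rw [show seenStep s q = s ++ [q.1] by simp [seenStep, h]]
      refine ih _ ?_
      rw [List.nodup_append]
      exact ⟨hs, List.nodup_singleton _, fun a ha b hb => by
        simp only [List.mem_singleton] at hb
        subst hb
        exact fun he => h (he ▸ ha)⟩

lemma nodup_seenF (l : List (Int × Int)) : (seenF l).Nodup := nodup_seen_aux l [] (by simp)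

lemma seenF_append (l : List (Int × Int)) (q : Int × Int) :
    seenF (l ++ [q]) = if (seenF l).contains q.1 then seenF l else seenF l ++ [q.1] := by
  rw [seenF, List.foldl_append]; rfl

lemma wsOf_append (l : List (Int × Int)) (q : Int × Int) (d : Int) :
    wsOf (l ++ [q]) d = wsOf l d ++ if q.1 = d then [q.2] else [] := by
  unfold wsOf
  rw [List.filter_append]
  by_cases h : q.1 = d <;> simp [h]

lemma minv_append_ne (l : List (Int × Int)) (q : Int × Int) (d : Int) (h : d ≠ q.1) :
    minv (l ++ [q]) d = minv l d := by
  unfold minv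
  rw [wsOf_append, if_neg (fun he => h he.symm), List.append_nil]

lemma filter_ne_nil_of_mem (l : List (Int × Int)) (d : Int) (h : d ∈ l.map (·.1)) :
    wsOf l d ≠ [] := by
  obtain ⟨a, ha, hk⟩ := List.mem_map.mp h
  intro hnil
  unfold wsOf at hnil
  rw [List.map_eq_nil_iff, List.filter_eq_nil_iff] at hnil
  exact hnil a ha (by simp [hk])

lemma minv_append_same (l : List (Int × Int)) (q : Int × Int) :
    minv (l ++ [q]) q.1
      = if q.1 ∈ l.map (·.1) then min (minv l q.1) q.2 else q.2 := by
  unfold minv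
  rw [wsOf_append, if_pos rfl]
  by_cases h : q.1 ∈ l.map (·.1)
  · rw [if_pos h]
    obtain ⟨x, t, hxt⟩ := List.exists_cons_of_ne_nil (filter_ne_nil_of_mem l q.1 h)
    rw [hxt]
    rw [show (x :: t) ++ [q.2] = x :: (t ++ [q.2]) by simp,
      PySem.List.min?_id_cons, PySem.List.min?_id_cons, List.foldl_append]
    simp
  · rw [if_neg h]
    have : wsOf l q.1 = [] := by
      by_contra hne
      obtain ⟨x, t, hxt⟩ := List.exists_cons_of_ne_nil hne
      have : q.1 ∈ l.map (·.1) := by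
        have hx : x ∈ wsOf l q.1 := by rw [hxt]; exact List.mem_cons_self ..
        unfold wsOf at hx
        obtain ⟨a, ha, _⟩ := List.mem_map.mp hx
        have := List.mem_filter.mp ha
        exact List.mem_map.mpr ⟨a, this.1, by simpa using this.2⟩
      exact h this
    rw [this]
    simp [PySem.List.min?_id_cons]

lemma foldMin_items (l : List (Int × Int)) :
    (l.foldl minStep PySem.Dict.empty).items = (seenF l).map (fun d => (d, minv l d)) := by
  induction l using List.reverseRecOn with
  | nil => rfl
  | append_singleton l q ih =>
    rw [List.foldl_append, List.foldl_cons, List.foldl_nil]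
    have hkeys : (l.foldl minStep PySem.Dict.empty).keys = seenF l := by
      show ((l.foldl minStep PySem.Dict.empty).items.map (·.1)) = seenF l
      rw [ih, List.map_map]
      have hcomp : ((fun x : Int × Int => x.1) ∘ fun d => (d, minv l d)) = id := rfl
      rw [hcomp, List.map_id]
    have hnd : (l.foldl minStep PySem.Dict.empty).keys.Nodup := by
      rw [hkeys]; exact nodup_seenF l
    by_cases hm : q.1 ∈ l.map (·.1)
    · have hmem : q.1 ∈ seenF l := (mem_seenF l q.1).mpr hm
      have hcont : (l.foldl minStep PySem.Dict.empty).contains q.1 = true := by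
        rw [PySem.Dict.contains_iff_mem_keys, hkeys]; exact hmem
      have hget : (l.foldl minStep PySem.Dict.empty).getD q.1 0 = minv l q.1 := by
        apply PySem.Dict.getD_of_mem_items _ _ hnd
        rw [ih]; exact List.mem_map.mpr ⟨q.1, hmem, rfl⟩
      rw [show minStep (l.foldl minStep PySem.Dict.empty) q
          = (l.foldl minStep PySem.Dict.empty).insert q.1 (min (minv l q.1) q.2) by
        simp [minStep, hcont, hget]]
      rw [PySem.Dict.items_insert_of_contains _ _ hcont, ih, List.map_map,
        seenF_append, if_pos (List.contains_iff_mem.mpr hmem)]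
      apply List.map_congr_left
      intro d hd
      by_cases hdq : d = q.1
      · subst hdq
        simp only [Function.comp_apply, beq_self_eq_true, if_pos]
        rw [minv_append_same, if_pos hm]
      · simp only [Function.comp_apply]
        rw [if_neg (by simpa using hdq), minv_append_ne l q d hdq]
    · have hmem : q.1 ∉ seenF l := fun h => hm ((mem_seenF l q.1).mp h)
      have hcont : (l.foldl minStep PySem.Dict.empty).contains q.1 = false := by
        cases hc : (l.foldl minStep PySem.Dict.empty).contains q.1 with
        | false => rfl
        | true =>
          exfalso
          have h2 : q.1 ∈ (l.foldl minStep PySem.Dict.empty).keys := by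
            rw [← PySem.Dict.contains_iff_mem_keys]; exact hc
          rw [hkeys] at h2
          exact hmem h2
      rw [show minStep (l.foldl minStep PySem.Dict.empty) q
          = (l.foldl minStep PySem.Dict.empty).insert q.1 q.2 by
        simp [minStep, hcont]]
      rw [PySem.Dict.items_insert_of_not_contains _ _ hcont, ih,
        seenF_append, if_neg (by simpa using hmem), List.map_append]
      congr 1
      · apply List.map_congr_left
        intro d hd
        have hdq : d ≠ q.1 := fun h => hmem (h ▸ hd)
        rw [minv_append_ne l q d hdq]
      · simp only [List.map_cons, List.map_nil]
        rw [minv_append_same, if_neg hm]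

lemma rowB_eq (edges : List (Int × Int × Int)) (src : Int) :
    rowB edges src = (outsOf edges src).foldl minStep PySem.Dict.empty := by
  apply PySem.Dict.ext
  rw [foldMin_items]
  dsimp only [rowB]
  have hseen : ((edges.filter (fun e => e.1 == src)).map (fun e => (e.2.1, e.2.2))).foldl
      seenStep [] = seenF (outsOf edges src) := rfl
  rw [hseen]
  have hcongr : (seenF (outsOf edges src)).foldl
      (fun acc d =>
        match PySem.List.min? ((((edges.filter (fun e => e.1 == src)).map
            (fun e => (e.2.1, e.2.2))).filter (fun q => q.1 == d)).map (fun q => q.2))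
            (fun x => x) with
        | some v => acc.insert d v
        | none => acc) PySem.Dict.empty
      = (seenF (outsOf edges src)).foldl
        (fun acc d => acc.insert d (minv (outsOf edges src) d)) PySem.Dict.empty := by
    apply PySem.List.foldl_congr_mem
    intro acc d hd
    have hne : wsOf (outsOf edges src) d ≠ [] :=
      filter_ne_nil_of_mem _ _ ((mem_seenF _ d).mp hd)
    have : PySem.List.min? (wsOf (outsOf edges src) d) (fun x => x) ≠ none :=
      fun hnone => hne ((PySem.List.min?_eq_none_iff _ _).mp hnone)
    obtain ⟨v, hv⟩ := Option.ne_none_iff_exists'.mp this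
    show (match PySem.List.min? (wsOf (outsOf edges src) d) (fun x => x) with
        | some v => acc.insert d v
        | none => acc) = acc.insert d (minv (outsOf edges src) d)
    rw [hv]
    unfold minv
    rw [hv]
  rw [hcongr,
    PySem.Dict.items_foldl_insert_fresh _ (fun d => d) (fun d => minv (outsOf edges src) d) _
      (fun a _ => PySem.Dict.contains_empty a) (by simpa using nodup_seenF (outsOf edges src))]
  rfl

lemma outsOf_append (e1 e2 : List (Int × Int × Int)) (src : Int) :
    outsOf (e1 ++ e2) src = outsOf e1 src ++ outsOf e2 src := by
  simp [outsOf, List.filter_append]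

lemma outs_head (cycle : List Int) (cstar src : Int) (p : Int × List (Int × Int)) :
    outsOf ((p.2.map (fun q => (relab cycle cstar p.1, relab cycle cstar q.1, q.2))).filter
        (fun e => e.1 != e.2.1)) src
      = if relab cycle cstar p.1 == src then rfRow cycle cstar src p.2 else [] := by
  unfold outsOf rfRow
  rw [List.filter_filter, List.filter_map, List.filter_map, List.map_map]
  by_cases h : relab cycle cstar p.1 = src
  · rw [if_pos (by simpa using h)]
    subst h
    apply congrArg₂ List.map rfl
    apply congrArg₂ List.filter _ rfl
    funext q
    simp [Function.comp]
  · rw [if_neg (by simpa using h)]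
    have hnil : ∀ q ∈ p.2, ¬(((fun a : Int × Int × Int => (a.1 == src) && (a.1 != a.2.1)) ∘
        (fun q : Int × Int => (relab cycle cstar p.1, relab cycle cstar q.1, q.2))) q = true) := by
      intro q _
      simp [Function.comp, h]
    rw [List.filter_eq_nil_iff.mpr hnil]
    rfl

lemma outsOf_edgesOf (cycle : List Int) (cstar : Int) (graph : List (Int × List (Int × Int)))
    (src : Int) :
    outsOf (edgesOf cycle cstar graph) src
      = graph.flatMap (fun p =>
          if relab cycle cstar p.1 == src then rfRow cycle cstar src p.2 else []) := by
  induction graph with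
  | nil => rfl
  | cons p g ih =>
    have hsplit : edgesOf cycle cstar (p :: g)
        = (p.2.map (fun q => (relab cycle cstar p.1, relab cycle cstar q.1, q.2))).filter
            (fun e => e.1 != e.2.1) ++ edgesOf cycle cstar g := by
      simp [edgesOf, List.filter_append]
    rw [hsplit, outsOf_append, ih, List.flatMap_cons, outs_head]

lemma foldl_flatMap {α β γ : Type} (g : List γ) (F : γ → List α) (f : β → α → β) :
    ∀ (a : β), (g.flatMap F).foldl f a = g.foldl (fun a p => (F p).foldl f a) a := by
  induction g with
  | nil => intro a; rfl
  | cons x t ih => intro a; simp only [List.flatMap_cons, List.foldl_append, List.foldl_cons, ih]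

lemma stepMinA_fold_eq (cycle : List Int) (cstar : Int) (row : List (Int × Int)) :
    ∀ (acc : PySem.Dict Int Int), (∀ q ∈ row, q.1 ≠ cstar) →
      row.foldl (stepMinA cycle) acc = (rfRow cycle cstar cstar row).foldl minStep acc := by
  induction row with
  | nil => intro acc _; rfl
  | cons q t ih =>
    intro acc hd
    have hd' : ∀ q' ∈ t, q'.1 ≠ cstar := fun q' h => hd q' (List.mem_cons_of_mem _ h)
    simp only [rfRow, List.map_cons, List.filter_cons, List.foldl_cons] at ih ⊢
    by_cases hq : q.1 ∈ cycle
    · have hrel : relab cycle cstar q.1 = cstar := by simp [relab, hq]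
      rw [hrel]
      simp only [bne_self_eq_false, Bool.false_eq_true, if_false]
      rw [show stepMinA cycle acc q = acc by simp [stepMinA, hq], ih _ hd']
    · have hrel : relab cycle cstar q.1 = q.1 := by simp [relab, hq]
      rw [hrel]
      have hkeep : (cstar != q.1) = true := by
        rw [bne_iff_ne]
        exact Ne.symm (hd q (List.mem_cons_self ..))
      rw [if_pos hkeep]
      simp only [List.foldl_cons]
      rw [show stepMinA cycle acc q = minStep acc (q.1, q.2) by
        simp [stepMinA, minStep, hq], ih _ hd']

lemma rowA_eq_min (cycle : List Int) (cstar s : Int) (hs : s ≠ cstar)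
    (row : List (Int × Int)) :
    ∀ (acc : PySem.Dict Int Int), (row.map (·.1)).Nodup → (∀ q ∈ row, q.1 ≠ cstar) →
      (∀ q ∈ row, q.1 ∉ cycle → q.1 ≠ s → acc.contains q.1 = false) →
      row.foldl (stepRowA cycle cstar s) acc = (rfRow cycle cstar s row).foldl minStep acc := by
  induction row with
  | nil => intro acc _ _ _; rfl
  | cons q t ih =>
    intro acc hnd hd hacc
    have hnd' := List.nodup_cons.mp (by simpa only [List.map_cons] using hnd)
    have hd' : ∀ q' ∈ t, q'.1 ≠ cstar := fun q' h => hd q' (List.mem_cons_of_mem _ h)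
    simp only [rfRow, List.map_cons, List.filter_cons, List.foldl_cons] at ih ⊢
    by_cases hq : q.1 ∈ cycle
    · have hrel : relab cycle cstar q.1 = cstar := by simp [relab, hq]
      rw [hrel, if_pos (by rw [bne_iff_ne]; exact hs)]
      simp only [List.foldl_cons]
      rw [show stepRowA cycle cstar s acc q = minStep acc (cstar, q.2) by
        simp [stepRowA, minStep, hq]]
      apply ih _ hnd'.2 hd'
      intro q' hq' hcy' hs'
      have : minStep acc (cstar, q.2) = acc.insert cstar (if acc.contains cstar then
          min (acc.getD cstar 0) q.2 else q.2) := by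
        unfold minStep
        by_cases hc : acc.contains cstar = true <;> simp [hc]
      rw [this, PySem.Dict.contains_insert]
      have : (q'.1 == cstar) = false := by simpa using hd' q' hq'
      rw [this]
      simpa using hacc q' (List.mem_cons_of_mem _ hq') hcy' hs'
    · have hrel : relab cycle cstar q.1 = q.1 := by simp [relab, hq]
      rw [hrel]
      by_cases hqs : q.1 = s
      · rw [if_neg (by simp [hqs])]
        have hqc : cycle.contains q.1 = false := by simpa using hq
        have hsq : (s != q.1) = false := by simp [hqs]
        rw [show stepRowA cycle cstar s acc q = acc by simp [stepRowA, hq, hsq]]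
        exact ih _ hnd'.2 hd' (fun q' h a b => hacc q' (List.mem_cons_of_mem _ h) a b)
      · have hsq : (s != q.1) = true := by rw [bne_iff_ne]; exact Ne.symm hqs
        rw [if_pos hsq]
        simp only [List.foldl_cons]
        have hcontq : acc.contains q.1 = false := hacc q (List.mem_cons_self ..) hq hqs
        have hqc : cycle.contains q.1 = false := by simpa using hq
        rw [show stepRowA cycle cstar s acc q = acc.insert q.1 q.2 by
            simp [stepRowA, hq, hsq],
          show minStep acc (q.1, q.2) = acc.insert q.1 q.2 by simp [minStep, hcontq]]
        apply ih _ hnd'.2 hd'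
        intro q' hq' hcy' hs'
        rw [PySem.Dict.contains_insert]
        have : (q'.1 == q.1) = false := by
          have : q'.1 ≠ q.1 := by
            intro h
            exact hnd'.1 (h ▸ List.mem_map_of_mem hq')
          simpa using this
        rw [this]
        simpa using hacc q' (List.mem_cons_of_mem _ hq') hcy' hs'

lemma outsOf_cstar (cycle : List Int) (cstar : Int) (graph : List (Int × List (Int × Int)))
    (hk : ∀ p ∈ graph, p.1 ≠ cstar) :
    outsOf (edgesOf cycle cstar graph) cstar
      = graph.flatMap (fun p =>
          if cycle.contains p.1 then rfRow cycle cstar cstar p.2 else []) := by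
  rw [outsOf_edgesOf]
  induction graph with
  | nil => rfl
  | cons p g ih =>
    simp only [List.flatMap_cons]
    rw [ih (fun p' h => hk p' (List.mem_cons_of_mem _ h))]
    congr 1
    by_cases h : p.1 ∈ cycle
    · simp [relab, h]
    · have : relab cycle cstar p.1 = p.1 := by simp [relab, h]
      rw [this]
      have h2 : (p.1 == cstar) = false := by simpa using hk p (List.mem_cons_self ..)
      simp [h2, h]

lemma cstar_row (cycle : List Int) (cstar : Int) (graph : List (Int × List (Int × Int)))
    (hk : ∀ p ∈ graph, p.1 ≠ cstar) (hd : ∀ p ∈ graph, ∀ q ∈ p.2, q.1 ≠ cstar) :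
    outFoldA cycle graph PySem.Dict.empty
      = (outsOf (edgesOf cycle cstar graph) cstar).foldl minStep PySem.Dict.empty := by
  rw [outsOf_cstar cycle cstar graph hk, foldl_flatMap]
  unfold outFoldA
  apply PySem.List.foldl_congr_mem
  intro acc p hp
  by_cases h : p.1 ∈ cycle
  · rw [if_pos (by simpa using h), if_pos (by simpa using h)]
    exact stepMinA_fold_eq cycle cstar p.2 acc (hd p hp)
  · rw [if_neg (by simpa using h), if_neg (by simpa using h)]
    rfl

lemma outsOf_single (cycle : List Int) (cstar : Int) (graph : List (Int × List (Int × Int)))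
    (p : Int × List (Int × Int)) (hp : p ∈ graph) (hnd : (graph.map (·.1)).Nodup)
    (hk : ∀ p' ∈ graph, p'.1 ≠ cstar) (hcy : p.1 ∉ cycle) :
    outsOf (edgesOf cycle cstar graph) p.1 = rfRow cycle cstar p.1 p.2 := by
  rw [outsOf_edgesOf]
  induction graph with
  | nil => simp at hp
  | cons a g ih =>
    have hnd2 := List.nodup_cons.mp (by simpa only [List.map_cons] using hnd)
    simp only [List.flatMap_cons]
    rcases List.mem_cons.mp hp with heq | hpg
    · subst heq
      have hrel : relab cycle cstar p.1 = p.1 := by simp [relab, hcy]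
      rw [hrel, if_pos (by simp)]
      have hrest : g.flatMap (fun p' =>
          if relab cycle cstar p'.1 == p.1 then rfRow cycle cstar p.1 p'.2 else []) = [] := by
        rw [List.flatMap_eq_nil_iff]
        intro p' hp'
        have hne : relab cycle cstar p'.1 ≠ p.1 := by
          by_cases h : p'.1 ∈ cycle
          · rw [show relab cycle cstar p'.1 = cstar by simp [relab, h]]
            exact fun h2 => hk p (List.mem_cons_self ..) h2.symm
          · rw [show relab cycle cstar p'.1 = p'.1 by simp [relab, h]]
            intro h2
            exact hnd2.1 (h2 ▸ List.mem_map_of_mem hp')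
        rw [if_neg (by simpa using hne)]
      rw [hrest, List.append_nil]
    · have hne : relab cycle cstar a.1 ≠ p.1 := by
        by_cases h : a.1 ∈ cycle
        · rw [show relab cycle cstar a.1 = cstar by simp [relab, h]]
          exact fun h2 => hk p (List.mem_cons_of_mem _ hpg) h2.symm
        · rw [show relab cycle cstar a.1 = a.1 by simp [relab, h]]
          intro h2
          exact hnd2.1 (h2 ▸ List.mem_map_of_mem hpg)
      rw [if_neg (by simpa using hne), List.nil_append]
      exact ih hpg (by simpa only [List.map_cons] using hnd2.2)
        (fun p' h => hk p' (List.mem_cons_of_mem _ h))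

-- ===== VERDICT (by name: the statement is the Claim_ definition above) =====
theorem contract_cycle_spec : Claim_equal_contract_cycle := by
  intro graph cycle _ hpre
  obtain ⟨-, hnd, hinnd, hdest⟩ := hpre
  unfold Spec_contract_cycle contract_cycle contract_cycle_alt
  cases hmax : PySem.List.max? (graph.map (·.1)) (fun x => x) with
  | none => rfl
  | some m =>
    dsimp only
    have hnotin : (m + 1 : Int) ∉ graph.map (·.1) := by
      intro h
      have h2 : (m + 1 : Int) ≤ m := PySem.List.max?_isMax hmax _ h
      omega
    set cstar : Int := m + 1 with hcstar
    have hk : ∀ p ∈ graph, p.1 ≠ cstar := by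
      intro p hp h
      exact hnotin (h ▸ List.mem_map_of_mem hp)
    have hd : ∀ p ∈ graph, ∀ q ∈ p.2, q.1 ≠ cstar := by
      intro p hp q hq h
      have := hdest p hp q hq
      rw [hmax] at this
      apply this
      rw [hcstar] at h
      simp [h]
    -- B's quotient edge list is edgesOf
    have hedges : (graph.flatMap (fun p => p.2.map (fun q =>
        ((if PySem.Set.contains (PySem.Set.ofList cycle) p.1 then cstar else p.1),
         (if PySem.Set.contains (PySem.Set.ofList cycle) q.1 then cstar else q.1),
         q.2)))).filter (fun e => e.1 != e.2.1) = edgesOf cycle cstar graph := by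
      simp only [set_contains_ofList, edgesOf, relab]
    -- A's result items
    set seed := (graph.map (·.1)).foldl
      (fun r k => if cycle.contains k then r else r.insert k PySem.Dict.empty)
      (PySem.Dict.empty.insert cstar PySem.Dict.empty) with hseeddef
    set fk := (graph.map (·.1)).filter (fun k => !cycle.contains k) with hfk
    have hseed : seed.items = (cstar, PySem.Dict.empty)
        :: fk.map (fun k => (k, (PySem.Dict.empty : PySem.Dict Int Int))) :=
      seed_items graph cycle cstar hnotin hnd
    have hseedkeys : seed.keys = cstar :: fk := by
      simp only [PySem.Dict.keys, hseed, List.map_cons, List.map_map]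
      have hcomp : ((fun (x : Int × PySem.Dict Int Int) => x.1) ∘ fun k => (k, PySem.Dict.empty))
          = fun k => k := rfl
      rw [hcomp]
      simp
    have hfksub : ∀ k ∈ fk, k ∈ graph.map (·.1) := fun k hk => List.mem_of_mem_filter hk
    have hseednodup : seed.keys.Nodup := by
      rw [hseedkeys]
      exact List.nodup_cons.mpr ⟨fun h => hnotin (hfksub _ h), hnd.filter _⟩
    have hseedc : seed.contains cstar = true := by
      rw [PySem.Dict.contains_iff_mem_keys, hseedkeys]; exact List.mem_cons_self ..
    have hseedg : ∀ p ∈ graph, cycle.contains p.1 = false → seed.contains p.1 = true := by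
      intro p hp hcy
      rw [PySem.Dict.contains_iff_mem_keys, hseedkeys]
      refine List.mem_cons_of_mem _ (List.mem_filter.mpr ⟨List.mem_map_of_mem hp, ?_⟩)
      simpa using hcy
    have hseedgetDc : seed.getD cstar PySem.Dict.empty = PySem.Dict.empty :=
      PySem.Dict.getD_of_mem_items seed (by rw [hseed]; exact List.mem_cons_self ..)
        hseednodup _
    have hseedgetDk : ∀ k ∈ fk, seed.getD k PySem.Dict.empty = PySem.Dict.empty := by
      intro k hk
      refine PySem.Dict.getD_of_mem_items seed ?_ hseednodup _
      rw [hseed]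
      exact List.mem_cons_of_mem _ (List.mem_map_of_mem hk)
    have hAkeys := bigF_keys cycle cstar graph seed hseedc hseednodup hseedg
    have hAnodup : (bigF cycle cstar graph seed).keys.Nodup := by
      rw [hAkeys]; exact hseednodup
    have hA : (bigF cycle cstar graph seed).items
        = (cstar, outFoldA cycle graph PySem.Dict.empty)
          :: (graph.filter (fun p => !cycle.contains p.1)).map
               (fun p => (p.1, p.2.foldl (stepRowA cycle cstar p.1) PySem.Dict.empty)) := by
      rw [PySem.Dict.items_eq_map_keys _ hAnodup PySem.Dict.empty, hAkeys, hseedkeys,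
        List.map_cons]
      have h1 : (bigF cycle cstar graph seed).getD cstar PySem.Dict.empty
          = outFoldA cycle graph PySem.Dict.empty := by
        rw [bigF_getD_cstar cycle cstar graph seed hseedc hseednodup hseedg hnotin,
          hseedgetDc]
      have h2 : fk.map (fun k => (k, (bigF cycle cstar graph seed).getD k PySem.Dict.empty))
          = (graph.filter (fun p => !cycle.contains p.1)).map
              (fun p => (p.1, p.2.foldl (stepRowA cycle cstar p.1) PySem.Dict.empty)) := by
        rw [hfk, filter_keys, List.map_map]
        refine List.map_congr_left ?_
        intro p hp
        have hpg : p ∈ graph := List.mem_of_mem_filter hp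
        have hcy : cycle.contains p.1 = false := by
          have := (List.mem_filter.mp hp).2; simpa using this
        have hmemfk : p.1 ∈ fk := by
          rw [hfk, filter_keys]; exact List.mem_map_of_mem hp
        simp only [Function.comp_apply]
        rw [bigF_getD_source cycle cstar graph seed p hseedc hseednodup hseedg hnotin hnd
          hpg hcy, hseedgetDk p.1 hmemfk]
      rw [h1, h2]
    -- B's result items
    have hB := alt_items graph cycle cstar (edgesOf cycle cstar graph)
      (rowB (edgesOf cycle cstar graph) cstar) hnotin hnd
    rw [hedges]
    -- rows agree
    have hrowc : rowB (edgesOf cycle cstar graph) cstar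
        = outFoldA cycle graph PySem.Dict.empty := by
      rw [rowB_eq, cstar_row cycle cstar graph hk hd]
    have hrows : ∀ p ∈ graph.filter (fun p => !cycle.contains p.1),
        p.2.foldl (stepRowA cycle cstar p.1) PySem.Dict.empty
          = rowB (edgesOf cycle cstar graph) p.1 := by
      intro p hp
      have hpg : p ∈ graph := List.mem_of_mem_filter hp
      have hcy : p.1 ∉ cycle := by
        have := (List.mem_filter.mp hp).2; simpa using this
      rw [rowB_eq, outsOf_single cycle cstar graph p hpg hnd hk hcy]
      exact rowA_eq_min cycle cstar p.1 (hk p hpg) p.2 PySem.Dict.empty (hinnd p hpg)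
        (hd p hpg) (fun q _ _ _ => PySem.Dict.contains_empty q.1)
    have hitems : (bigF cycle cstar graph seed).items
        = (graph.foldl (fun r p =>
            if PySem.Set.contains (PySem.Set.ofList cycle) p.1 then r
            else r.insert p.1 (rowB (edgesOf cycle cstar graph) p.1))
          (PySem.Dict.empty.insert cstar (rowB (edgesOf cycle cstar graph) cstar))).items := by
      rw [hA, hB, hrowc]
      congr 1
      exact List.map_congr_left (fun p hp => by rw [hrows p hp])
    exact congrArg₂ Prod.mk (congrArg (List.map _) hitems) rfl
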